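-- pv_equiv track=rewrite | github.com/jeprinz/MuffinProblem | scott.py | deconstructLchain
-- ===== SOURCE A (Python) =====
-- def deconstructLchain(pieces, Pm, Ps2, Vm, Vs2, L):
--     """Input is list of pieces, output [muffins, students] which are both lists of lists of pieces."""
--     Pm = int(Pm) #we need to make sure these are integers and not Fraction objects
--     Ps2 = int(Ps2)
--     if L == 0:
--         return ([pieces], [])
--     #if L == 1:
--     #    return deconstruct1chain(pieces, Pm, Ps2, Vm)
--     else: #We compute the left-most student (and his muffins) and then recurse
--         #first, find the Ps2-1 muffins on the left-most student. Refer to these as left-muffins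
--         numLeftPieces = (Ps2-1)*(Pm-1)
--         leftPieces = pieces[:numLeftPieces] #find pieces for left-muffins
--         bridgePieces = pieces[numLeftPieces:numLeftPieces + Pm - 2] #Pieces that go to muffin connecting left student to next student
--         leftOverPieces = pieces[numLeftPieces + Pm - 2:] #all the rest of the pieces
--
--         muffinsMissingLastPiece = divide_chunks(leftPieces, Pm-1)#first find list of most of muffins, missing last piece (connected to student)
--         muffins = [partialM + [Vm - sum(partialM)] for partialM in muffinsMissingLastPiece]#find what the size of the last piece is
--         studentMissingLastPiece = [muffin[-1] for muffin in muffins]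
--         student = studentMissingLastPiece + [Vs2 - sum(studentMissingLastPiece)]
--         newPieces = [student[-1]] + bridgePieces + leftOverPieces #add that last piece of the student on to the pieces to be used in recursion - this is bridge muffin piece
--
--         (restOfMuffins, restOfStudents) = deconstructLchain(newPieces, Pm, Ps2, Vm, Vs2, L-1) #calculate the answer for smaller chain
--
--         return (muffins + restOfMuffins, [student] + restOfStudents)
--
-- def divide_chunks(l, n): #divide a list into equal sized pieces
--     for i in range(0, len(l), n):
--         yield l[i:i + n]
-- ===== SOURCE B (Python) =====
-- # intended as faster: one pass with an index pointer instead of A's re-slicing recursion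
-- # B: single left-to-right pass with an index pointer and a small push-back buffer,
-- # instead of A's recursion that re-slices the whole remaining list at every level.
--
-- def _take(pieces, buf, i, k):
--     """Pop up to k pieces from the stream (buf first, then pieces[i:])."""
--     out = []
--     for _ in range(k):
--         if buf:
--             out.append(buf.pop(0))
--         elif i < len(pieces):
--             out.append(pieces[i])
--             i += 1
--         else:
--             break
--     return out, buf, i
--
-- def deconstructLchain(pieces, Pm, Ps2, Vm, Vs2, L):
--     Pm = int(Pm)
--     Ps2 = int(Ps2)
--     muffins, students = [], []
--     buf, i = [], 0
--     for _ in range(L):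
--         tail = []
--         for _ in range(Ps2 - 1):
--             if not buf and i >= len(pieces):
--                 break
--             chunk, buf, i = _take(pieces, buf, i, Pm - 1)
--             last = Vm - sum(chunk)
--             muffins.append(chunk + [last])
--             tail.append(last)
--         s_last = Vs2 - sum(tail)
--         students.append(tail + [s_last])
--         bridge, buf, i = _take(pieces, buf, i, Pm - 2)
--         buf = [s_last] + bridge + buf
--     muffins.append(buf + pieces[i:])
--     return (muffins, students)
-- ===== Notes on version B (the rewrite author's own statement) =====
-- stated objective: faster
-- what changed: Replaced A's recursion that copies and re-slices the entire remaining pieces list at every one of the L levels (and chunks via a range generator) by a single left-to-right pass using an index pointer into pieces plus a small push-back buffer for the bridge pieces.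
-- outside the precondition, e.g. on deconstructLchain([1], 0, 2, 5, 5, 1): A returns ([[5, 1]], [[5]]), B returns ([[5], [0, 1]], [[5, 0]]); on deconstructLchain([1, 2], 2, 0, 0, 0, 1): A returns ([[1, -1], [1, 2]], [[-1, 1]]), B returns ([[0, 1, 2]], [[0]])
import Mathlib
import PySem

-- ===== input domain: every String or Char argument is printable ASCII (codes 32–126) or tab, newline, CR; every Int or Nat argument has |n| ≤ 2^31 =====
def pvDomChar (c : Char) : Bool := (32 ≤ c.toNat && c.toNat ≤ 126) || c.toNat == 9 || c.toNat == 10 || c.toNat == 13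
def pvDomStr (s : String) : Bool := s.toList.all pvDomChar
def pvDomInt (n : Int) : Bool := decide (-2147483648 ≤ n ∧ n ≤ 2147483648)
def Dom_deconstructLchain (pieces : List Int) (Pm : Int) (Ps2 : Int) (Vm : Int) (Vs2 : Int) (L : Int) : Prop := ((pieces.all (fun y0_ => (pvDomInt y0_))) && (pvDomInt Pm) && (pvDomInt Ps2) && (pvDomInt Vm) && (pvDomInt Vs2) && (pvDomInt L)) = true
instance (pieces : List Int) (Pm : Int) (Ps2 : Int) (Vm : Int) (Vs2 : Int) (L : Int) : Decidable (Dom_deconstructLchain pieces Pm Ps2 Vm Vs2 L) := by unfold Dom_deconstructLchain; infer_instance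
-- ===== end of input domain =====

-- B replaces A's recursion (which re-slices the whole remaining list at every level) by a single
-- left-to-right pass with an index pointer and a small push-back buffer; intended as faster.

-- ===== PORT A =====
-- divide_chunks(l, n): list of the generator's yields
def pvDivideChunks (l : List Int) (n : Int) : List (List Int) :=
  (PySem.List.pyRange 0 (l.length : Int) n).map
    (fun i => PySem.List.slice l (some i) (some (i + n)))

-- the recursive body of A; fuel = L (Python recurses on L-1 until L == 0)
def pvAGo (Pm Ps2 Vm Vs2 : Int) : Nat → List Int → List (List Int) × List (List Int)
  | 0, pieces => ([pieces], [])
  | f + 1, pieces =>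
    let numLeftPieces := (Ps2 - 1) * (Pm - 1)
    let leftPieces := PySem.List.slice pieces none (some numLeftPieces)
    let bridgePieces := PySem.List.slice pieces (some numLeftPieces) (some (numLeftPieces + Pm - 2))
    let leftOverPieces := PySem.List.slice pieces (some (numLeftPieces + Pm - 2)) none
    let muffinsMissingLastPiece := pvDivideChunks leftPieces (Pm - 1)
    let muffins := muffinsMissingLastPiece.map (fun partialM => partialM ++ [Vm - partialM.sum])
    -- muffin[-1]: each muffin ends in its appended last piece, so the index is always in range
    let studentMissingLastPiece := muffins.map (fun m => PySem.List.pyGetD m (-1) 0)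
    let student := studentMissingLastPiece ++ [Vs2 - studentMissingLastPiece.sum]
    let newPieces := [PySem.List.pyGetD student (-1) 0] ++ bridgePieces ++ leftOverPieces
    let rest := pvAGo Pm Ps2 Vm Vs2 f newPieces
    (muffins ++ rest.1, [student] ++ rest.2)

def deconstructLchain (pieces : List Int) (Pm : Int) (Ps2 : Int) (Vm : Int) (Vs2 : Int) (L : Int) : List (List Int) × List (List Int) :=
  pvAGo Pm Ps2 Vm Vs2 L.toNat pieces

-- ===== PORT B =====
-- _take(pieces, buf, i, k): pop up to k pieces from the stream (buf first, then pieces[i:])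
def pvTake (pieces : List Int) : Nat → List Int → Nat → List Int × List Int × Nat
  | 0, buf, i => ([], buf, i)
  | k + 1, buf, i =>
    match buf with
    | b :: rest =>
        let r := pvTake pieces k rest i
        (b :: r.1, r.2)
    | [] =>
        if h : i < pieces.length then
          let r := pvTake pieces k [] (i + 1)
          (pieces[i] :: r.1, r.2)
        else ([], [], i)

-- the inner 'for _ in range(Ps2 - 1)' loop: build the left muffins and the student's tail
def pvMuffLoop (pieces : List Int) (Pm Vm : Int) : Nat → List Int → Nat → List (List Int) × List Int × List Int × Nat
  | 0, buf, i => ([], [], buf, i)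
  | k + 1, buf, i =>
    if buf = [] ∧ pieces.length ≤ i then ([], [], buf, i)
    else
      let t := pvTake pieces (Pm - 1).toNat buf i
      let last := Vm - t.1.sum
      let r := pvMuffLoop pieces Pm Vm k t.2.1 t.2.2
      ((t.1 ++ [last]) :: r.1, last :: r.2.1, r.2.2)

-- the outer 'for _ in range(L)' loop
def pvLevelLoop (pieces : List Int) (Pm Ps2 Vm Vs2 : Int) : Nat → List Int → Nat → List (List Int) × List (List Int) × List Int × Nat
  | 0, buf, i => ([], [], buf, i)
  | f + 1, buf, i =>
    let m := pvMuffLoop pieces Pm Vm (Ps2 - 1).toNat buf i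
    let sLast := Vs2 - m.2.1.sum
    let b := pvTake pieces (Pm - 2).toNat m.2.2.1 m.2.2.2
    let r := pvLevelLoop pieces Pm Ps2 Vm Vs2 f (sLast :: (b.1 ++ b.2.1)) b.2.2
    (m.1 ++ r.1, (m.2.1 ++ [sLast]) :: r.2.1, r.2.2)

def deconstructLchain_alt (pieces : List Int) (Pm : Int) (Ps2 : Int) (Vm : Int) (Vs2 : Int) (L : Int) : List (List Int) × List (List Int) :=
  let r := pvLevelLoop pieces Pm Ps2 Vm Vs2 L.toNat [] 0
  (r.1 ++ [r.2.2.1 ++ pieces.drop r.2.2.2], r.2.1)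

-- ===== PRECONDITION & SPEC =====
-- Pre_ keeps the natural domain of the algorithm: L ≥ 0 (Python A recurses forever on L < 0,
-- raising RecursionError) and, when at least one level is deconstructed, a muffin has Pm ≥ 2
-- pieces and a chain student Ps2 ≥ 1 muffins.  Pm = 1 makes divide_chunks raise ValueError
-- (range step 0); Pm ≤ 0 or Ps2 ≤ 0 make the slice bounds negative, so A still returns, but
-- only accidental negative-index-wraparound values outside the algorithm's meaning — those
-- degenerate parameter values are excluded (concrete examples in the claim's cites).
def Pre_deconstructLchain (pieces : List Int) (Pm : Int) (Ps2 : Int) (Vm : Int) (Vs2 : Int) (L : Int) : Prop :=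
  0 ≤ L ∧ (L = 0 ∨ (2 ≤ Pm ∧ 1 ≤ Ps2))
instance (pieces : List Int) (Pm : Int) (Ps2 : Int) (Vm : Int) (Vs2 : Int) (L : Int) : Decidable (Pre_deconstructLchain pieces Pm Ps2 Vm Vs2 L) := by unfold Pre_deconstructLchain; infer_instance

def pvWitness_deconstructLchain : List Int × Int × Int × Int × Int × Int := ([1, 2, 3, 4, 5], 2, 2, 3, 4, 2)

def Spec_deconstructLchain (pieces : List Int) (Pm : Int) (Ps2 : Int) (Vm : Int) (Vs2 : Int) (L : Int) (out : List (List Int) × List (List Int)) : Prop := out = deconstructLchain_alt pieces Pm Ps2 Vm Vs2 L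
instance (pieces : List Int) (Pm : Int) (Ps2 : Int) (Vm : Int) (Vs2 : Int) (L : Int) (out : List (List Int) × List (List Int)) : Decidable (Spec_deconstructLchain pieces Pm Ps2 Vm Vs2 L out) := by unfold Spec_deconstructLchain; infer_instance

-- ===== CLAIM (what is proved, stated in full; the proofs are below) =====
def Claim_equal_deconstructLchain : Prop := ∀ (pieces : List Int) (Pm : Int) (Ps2 : Int) (Vm : Int) (Vs2 : Int) (L : Int), Dom_deconstructLchain pieces Pm Ps2 Vm Vs2 L → Pre_deconstructLchain pieces Pm Ps2 Vm Vs2 L → Spec_deconstructLchain pieces Pm Ps2 Vm Vs2 L (deconstructLchain pieces Pm Ps2 Vm Vs2 L)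

-- ===== LEMMAS AND PROOFS =====

-- chunking a list into blocks of sz (last block may be short); reference form of divide_chunks
def pvChunksOf (sz : Nat) : List Int → List (List Int)
  | [] => []
  | x :: xs => (x :: xs.take (sz - 1)) :: pvChunksOf sz (xs.drop (sz - 1))
  termination_by l => l.length
  decreasing_by simp

theorem pvTake_spec (pieces : List Int) (k : Nat) : ∀ (buf : List Int) (i : Nat), i ≤ pieces.length →
    (pvTake pieces k buf i).1 = (buf ++ pieces.drop i).take k ∧
    (pvTake pieces k buf i).2.1 ++ pieces.drop (pvTake pieces k buf i).2.2 = (buf ++ pieces.drop i).drop k ∧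
    (pvTake pieces k buf i).2.2 ≤ pieces.length := by
  induction k with
  | zero => intro buf i hi; simp [pvTake, hi]
  | succ k ih =>
    intro buf i hi
    match buf with
    | b :: rest =>
      have h := ih rest i hi
      simp only [pvTake, List.cons_append, List.take_succ_cons, List.drop_succ_cons]
      exact ⟨by rw [h.1], h.2.1, h.2.2⟩
    | [] =>
      by_cases h : i < pieces.length
      · have hd : pieces.drop i = pieces[i] :: pieces.drop (i + 1) := (List.getElem_cons_drop h).symm
        have hih := ih [] (i + 1) (by omega)
        simp only [List.nil_append] at hih
        simp only [pvTake, dif_pos h, List.nil_append]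
        rw [hd, List.take_succ_cons, List.drop_succ_cons]
        exact ⟨by rw [hih.1], hih.2.1, hih.2.2⟩
      · have hnil : pieces.drop i = [] := List.drop_eq_nil_of_le (by omega)
        simp [pvTake, h, hnil, hi]

-- A's divide_chunks (range-of-slices form) equals direct recursive chunking, for chunk size ≥ 1
theorem pvDivideChunks_eq (sz : Nat) (hsz : 1 ≤ sz) : ∀ (l : List Int),
    pvDivideChunks l (sz : Int) = pvChunksOf sz l := by
  intro l
  induction hl : l.length using Nat.strong_induction_on generalizing l with
  | _ n ih =>
  have hszZ : (0:Int) < (sz:Int) := by exact_mod_cast hsz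
  match l with
  | [] =>
    rw [pvDivideChunks]
    simp [PySem.List.pyRange_of_pos 0 0 hszZ, pvChunksOf]
  | x :: xs =>
    have hlen : (0:Int) < (((x :: xs).length : Nat) : Int) := by
      exact_mod_cast Nat.succ_pos xs.length
    rw [pvDivideChunks, PySem.List.pyRange_of_pos 0 _ hszZ, if_pos (by simpa using hlen)]
    have hdiv : ((((x :: xs).length : Int)) - 0 + (sz:Int) - 1) / (sz:Int)
        = (((x :: xs).length : Int) - 1) / (sz:Int) + 1 := by
      have h1 := Int.add_mul_ediv_right (((x :: xs).length : Int) - 1) 1 (show (sz:Int) ≠ 0 by omega)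
      calc ((((x :: xs).length : Int)) - 0 + (sz:Int) - 1) / (sz:Int)
          = ((((x :: xs).length : Int) - 1) + 1 * (sz:Int)) / (sz:Int) := by ring_nf
        _ = _ := by rw [h1]
    have hq0 : (0:Int) ≤ (((x :: xs).length : Int) - 1) / (sz:Int) :=
      Int.ediv_nonneg (by omega) (by omega)
    have hcnt : (((((x :: xs).length : Int)) - 0 + (sz:Int) - 1) / (sz:Int)).toNat
        = ((((x :: xs).length : Int) - 1) / (sz:Int)).toNat + 1 := by
      rw [hdiv]; omega
    rw [hcnt, List.range_succ_eq_map, List.map_map, List.map_cons, List.map_map,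
      show pvChunksOf sz (x :: xs) = (x :: xs.take (sz - 1)) :: pvChunksOf sz (xs.drop (sz - 1)) from by rw [pvChunksOf]]
    have hdropcons : (x :: xs).drop sz = xs.drop (sz - 1) := by
      rw [show sz = (sz - 1) + 1 by omega, List.drop_succ_cons]
      congr 1
    congr 1
    · -- head chunk: l[0 : sz] = x :: xs.take (sz-1)
      simp only [Function.comp_apply, Nat.cast_zero, mul_zero, add_zero, zero_add]
      rw [PySem.List.slice_toNat (x :: xs) le_rfl (by omega)]
      simp only [Int.toNat_natCast, Int.toNat_zero, Nat.sub_zero, List.drop_zero]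
      rw [show sz = (sz - 1) + 1 by omega, List.take_succ_cons]
      simp
    · -- tail chunks: remaining slices are the chunks of l.drop sz
      have hstep : List.map (((fun i => PySem.List.slice (x :: xs) (some i) (some (i + (sz:Int)))) ∘ fun k : Nat => 0 + (sz:Int) * (k:Int)) ∘ Nat.succ)
            (List.range (((((x :: xs).length : Nat) : Int) - 1) / (sz:Int)).toNat)
          = List.map ((fun i => PySem.List.slice (xs.drop (sz - 1)) (some i) (some (i + (sz:Int)))) ∘ fun k : Nat => 0 + (sz:Int) * (k:Int))
            (List.range (((((x :: xs).length : Nat) : Int) - 1) / (sz:Int)).toNat) := by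
        refine List.map_congr_left (fun k _ => ?_)
        simp only [Function.comp_apply]
        have e1 : (0:Int) + (sz:Int) * ((k.succ : Nat) : Int) = ((sz * k.succ : Nat) : Int) := by push_cast; ring
        have e2 : (0:Int) + (sz:Int) * ((k.succ : Nat) : Int) + (sz:Int) = ((sz * k.succ + sz : Nat) : Int) := by push_cast; ring
        have e3 : (0:Int) + (sz:Int) * ((k : Nat) : Int) = ((sz * k : Nat) : Int) := by push_cast; ring
        have e4 : (0:Int) + (sz:Int) * ((k : Nat) : Int) + (sz:Int) = ((sz * k + sz : Nat) : Int) := by push_cast; ring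
        rw [e2, e1, e4, e3, PySem.List.slice_toNat _ (by omega) (by omega),
          PySem.List.slice_toNat _ (by omega) (by omega)]
        simp only [Int.toNat_natCast, Nat.add_sub_cancel_left]
        rw [← hdropcons, List.drop_drop, Nat.mul_succ]
        simp [Nat.add_comm]
      rw [hstep]
      have hcons : (x :: xs).length = xs.length + 1 := by simp
      have hld : (xs.drop (sz - 1)).length = xs.length - (sz - 1) := by simp
      by_cases hbig : (sz:Int) < (((x :: xs).length : Nat) : Int)
      · have hb2 : sz < (x :: xs).length := by exact_mod_cast hbig
        have hlen' : 0 < (xs.drop (sz - 1)).length := by omega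
        have ihl' := ih (xs.drop (sz - 1)).length (by omega) (xs.drop (sz - 1)) rfl
        rw [pvDivideChunks, PySem.List.pyRange_of_pos 0 _ hszZ,
          if_pos (by exact_mod_cast hlen'), List.map_map] at ihl'
        rw [← ihl']
        have hlenL' : (((xs.drop (sz - 1)).length : Nat) : Int) = (((x :: xs).length : Nat) : Int) - sz := by
          omega
        have h1 := Int.add_mul_ediv_right ((((x :: xs).length : Nat) : Int) - (sz:Int) - 1) 1 (show (sz:Int) ≠ 0 by omega)
        have d1 : ((((x :: xs).length : Nat) : Int) - 1) / (sz:Int)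
            = ((((x :: xs).length : Nat) : Int) - (sz:Int) - 1) / (sz:Int) + 1 := by
          calc ((((x :: xs).length : Nat) : Int) - 1) / (sz:Int)
              = (((((x :: xs).length : Nat) : Int) - (sz:Int) - 1) + 1 * (sz:Int)) / (sz:Int) := by ring_nf
            _ = _ := by rw [h1]
        have d2 : ((((xs.drop (sz - 1)).length : Nat) : Int) - 0 + (sz:Int) - 1) / (sz:Int)
            = ((((x :: xs).length : Nat) : Int) - (sz:Int) - 1) / (sz:Int) + 1 := by
          calc ((((xs.drop (sz - 1)).length : Nat) : Int) - 0 + (sz:Int) - 1) / (sz:Int)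
              = (((((x :: xs).length : Nat) : Int) - (sz:Int) - 1) + 1 * (sz:Int)) / (sz:Int) := by rw [hlenL']; ring_nf
            _ = _ := by rw [h1]
        congr 2
        rw [d1, d2]
      · have hb2 : (x :: xs).length ≤ sz := by exact_mod_cast not_lt.mp hbig
        have hl'nil : xs.drop (sz - 1) = [] := List.drop_eq_nil_of_le (by omega)
        have hc0 : ((((x :: xs).length : Nat) : Int) - 1) / (sz:Int) = 0 :=
          Int.ediv_eq_zero_of_lt (by omega) (by omega)
        rw [hc0, hl'nil, show pvChunksOf sz ([] : List Int) = [] from by rw [pvChunksOf]]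
        simp

-- peeling one chunk off a take of (m+1) chunks' worth of a nonempty stream
theorem pvChunksOf_take_succ (sz m : Nat) (hsz : 1 ≤ sz) (y : Int) (ys : List Int) :
    pvChunksOf sz ((y :: ys).take (m * sz + sz))
      = (y :: ys).take sz :: pvChunksOf sz ((ys.drop (sz - 1)).take (m * sz)) := by
  rw [show m * sz + sz = (m * sz + sz - 1) + 1 by omega, List.take_succ_cons, pvChunksOf]
  congr 1
  · rw [List.take_take, Nat.min_eq_left (by omega)]
    rw [show sz = (sz - 1) + 1 by omega, List.take_succ_cons]
    simp
  · rw [List.drop_take, show m * sz + sz - 1 - (sz - 1) = m * sz by omega]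

theorem pvMuffLoop_spec (pieces : List Int) (Pm Vm : Int) (hPm : 2 ≤ Pm) (m : Nat) :
    ∀ (buf : List Int) (i : Nat), i ≤ pieces.length →
    (pvMuffLoop pieces Pm Vm m buf i).1
      = (pvChunksOf (Pm-1).toNat ((buf ++ pieces.drop i).take (m * (Pm-1).toNat))).map (fun c => c ++ [Vm - c.sum]) ∧
    (pvMuffLoop pieces Pm Vm m buf i).2.1
      = (pvChunksOf (Pm-1).toNat ((buf ++ pieces.drop i).take (m * (Pm-1).toNat))).map (fun c => Vm - c.sum) ∧
    (pvMuffLoop pieces Pm Vm m buf i).2.2.1 ++ pieces.drop (pvMuffLoop pieces Pm Vm m buf i).2.2.2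
      = (buf ++ pieces.drop i).drop (m * (Pm-1).toNat) ∧
    (pvMuffLoop pieces Pm Vm m buf i).2.2.2 ≤ pieces.length := by
  have hsz : 1 ≤ (Pm-1).toNat := by omega
  induction m with
  | zero =>
    intro buf i hi
    simp [pvMuffLoop, pvChunksOf, hi]
  | succ m ih =>
    intro buf i hi
    by_cases hemp : buf = [] ∧ pieces.length ≤ i
    · have hs : buf ++ pieces.drop i = ([] : List Int) := by
        simp [hemp.1, List.drop_eq_nil_of_le hemp.2]
      rw [hs]
      simp [pvMuffLoop, hemp, hs, pvChunksOf, hi, hemp.1, List.drop_eq_nil_of_le hemp.2]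
    · have hsne : buf ++ pieces.drop i ≠ [] := by
        intro hc
        rcases List.append_eq_nil_iff.mp hc with ⟨h1, h2⟩
        exact hemp ⟨h1, by have := List.drop_eq_nil_iff.mp h2; omega⟩
      obtain ⟨y, ys, hys⟩ := List.exists_cons_of_ne_nil hsne
      have hdc : (y :: ys).drop (Pm-1).toNat = ys.drop ((Pm-1).toNat - 1) := by
        rw [show (Pm-1).toNat = ((Pm-1).toNat - 1) + 1 by omega, List.drop_succ_cons]
        congr 1
      have ht := pvTake_spec pieces (Pm-1).toNat buf i hi
      have ihh := ih (pvTake pieces (Pm-1).toNat buf i).2.1 (pvTake pieces (Pm-1).toNat buf i).2.2 ht.2.2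
      rw [ht.2.1] at ihh
      simp only [pvMuffLoop, if_neg hemp]
      rw [ht.1]
      refine ⟨?_, ?_, ?_, ihh.2.2.2⟩
      · rw [ihh.1, hys, hdc, Nat.succ_mul, pvChunksOf_take_succ _ _ hsz]
        simp
      · rw [ihh.2.1, hys, hdc, Nat.succ_mul, pvChunksOf_take_succ _ _ hsz]
        simp
      · rw [ihh.2.2.1, List.drop_drop, Nat.succ_mul, Nat.add_comm]

theorem pvLevel_spec (pieces : List Int) (Pm Ps2 Vm Vs2 : Int) (hPm : 2 ≤ Pm) (hPs2 : 1 ≤ Ps2) (f : Nat) :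
    ∀ (buf : List Int) (i : Nat), i ≤ pieces.length →
    pvAGo Pm Ps2 Vm Vs2 f (buf ++ pieces.drop i)
      = ((pvLevelLoop pieces Pm Ps2 Vm Vs2 f buf i).1
          ++ [(pvLevelLoop pieces Pm Ps2 Vm Vs2 f buf i).2.2.1
              ++ pieces.drop (pvLevelLoop pieces Pm Ps2 Vm Vs2 f buf i).2.2.2],
         (pvLevelLoop pieces Pm Ps2 Vm Vs2 f buf i).2.1) := by
  obtain ⟨sz, hsz1⟩ : ∃ sz : Nat, Pm - 1 = (sz : Int) := ⟨(Pm-1).toNat, by omega⟩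
  obtain ⟨bz, hbz⟩ : ∃ bz : Nat, Pm - 2 = (bz : Int) := ⟨(Pm-2).toNat, by omega⟩
  obtain ⟨mm, hmm⟩ : ∃ mm : Nat, Ps2 - 1 = (mm : Int) := ⟨(Ps2-1).toNat, by omega⟩
  have hsz : 1 ≤ sz := by omega
  induction f with
  | zero => intro buf i hi; simp [pvAGo, pvLevelLoop]
  | succ f ih =>
    intro buf i hi
    have hm := pvMuffLoop_spec pieces Pm Vm hPm (Ps2-1).toNat buf i hi
    rw [hsz1, hmm] at hm
    simp only [Int.toNat_natCast] at hm
    have hb := pvTake_spec pieces (Pm-2).toNat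
      (pvMuffLoop pieces Pm Vm mm buf i).2.2.1 (pvMuffLoop pieces Pm Vm mm buf i).2.2.2
      hm.2.2.2
    rw [hbz] at hb
    simp only [Int.toNat_natCast] at hb
    simp only [pvAGo, pvLevelLoop]
    rw [hsz1, hbz, hmm]
    simp only [Int.toNat_natCast]
    rw [show (mm : Int) * (sz : Int) = ((mm * sz : Nat) : Int) by push_cast; ring]
    rw [PySem.List.slice_to_natCast]
    rw [show ((mm * sz : Nat) : Int) + Pm - 2 = ((mm * sz : Nat) : Int) + ((bz : Nat) : Int) by omega]
    rw [PySem.List.slice_natCast_add]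
    rw [show ((mm * sz : Nat) : Int) + ((bz : Nat) : Int) = ((mm * sz + bz : Nat) : Int) by push_cast; ring]
    rw [PySem.List.slice_from_natCast]
    rw [pvDivideChunks_eq sz hsz]
    simp only [List.map_map, Function.comp_def, PySem.List.pyGetD_neg_one_append_singleton,
      List.singleton_append]
    -- rewrite bridge/leftover into the B-side take state
    rw [hm.2.2.1] at hb
    have hleft : List.drop (mm * sz + bz) (buf ++ List.drop i pieces)
        = (pvTake pieces bz (pvMuffLoop pieces Pm Vm mm buf i).2.2.1 (pvMuffLoop pieces Pm Vm mm buf i).2.2.2).2.1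
          ++ List.drop (pvTake pieces bz (pvMuffLoop pieces Pm Vm mm buf i).2.2.1 (pvMuffLoop pieces Pm Vm mm buf i).2.2.2).2.2 pieces := by
      rw [hb.2.1, List.drop_drop, Nat.add_comm]
    rw [hleft, ← hb.1, ← hm.2.1]
    have harg : ((Vs2 - (pvMuffLoop pieces Pm Vm mm buf i).2.1.sum) ::
          (pvTake pieces bz (pvMuffLoop pieces Pm Vm mm buf i).2.2.1 (pvMuffLoop pieces Pm Vm mm buf i).2.2.2).1)
            ++ ((pvTake pieces bz (pvMuffLoop pieces Pm Vm mm buf i).2.2.1 (pvMuffLoop pieces Pm Vm mm buf i).2.2.2).2.1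
              ++ List.drop (pvTake pieces bz (pvMuffLoop pieces Pm Vm mm buf i).2.2.1 (pvMuffLoop pieces Pm Vm mm buf i).2.2.2).2.2 pieces)
        = ((Vs2 - (pvMuffLoop pieces Pm Vm mm buf i).2.1.sum) ::
            ((pvTake pieces bz (pvMuffLoop pieces Pm Vm mm buf i).2.2.1 (pvMuffLoop pieces Pm Vm mm buf i).2.2.2).1
              ++ (pvTake pieces bz (pvMuffLoop pieces Pm Vm mm buf i).2.2.1 (pvMuffLoop pieces Pm Vm mm buf i).2.2.2).2.1))
          ++ List.drop (pvTake pieces bz (pvMuffLoop pieces Pm Vm mm buf i).2.2.1 (pvMuffLoop pieces Pm Vm mm buf i).2.2.2).2.2 pieces := by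
      simp [List.append_assoc]
    rw [harg, ih _ _ hb.2.2, hm.1, hm.2.1]
    simp [List.append_assoc]

-- ===== VERDICT (by name: the statement is the Claim_ definition above) =====
theorem deconstructLchain_spec : Claim_equal_deconstructLchain := by
  unfold Claim_equal_deconstructLchain
  intro pieces Pm Ps2 Vm Vs2 L _ hpre
  unfold Spec_deconstructLchain deconstructLchain deconstructLchain_alt
  rcases hpre with ⟨hL0, hcase⟩
  rcases hcase with hz | ⟨hPm, hPs2⟩
  · subst hz
    simp [pvAGo, pvLevelLoop]
  · have h := pvLevel_spec pieces Pm Ps2 Vm Vs2 hPm hPs2 L.toNat [] 0 (by omega)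
    simpa using h
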